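-- pv_equiv track=rewrite | github.com/microaistudio/documind-hr | Ask/be/services/answerer.py | _fix_leading_trunc
-- ===== SOURCE A (Python) =====
-- def _fix_leading_trunc(s: str) -> str:
--     """
--     Some upstream cleanup can drop the very first character of a line.
--     Restore the most common cases without changing meaning.
--     """
--     if not s:
--         return s
--     x = s.lstrip()
--     lowers = x.lower()
--     fixes = [
--         ("nd ", "and "),
--         ("r ", "or "),
--         ("pplying ", "applying "),
--         ("griculture ", "agriculture "),
--         ("nterest ", "interest "),
--         ("eneficiary ", "beneficiary "),
--         ("cheme ", "Scheme "),
--         ("oans ", "loans "),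
--     ]
--     for bad, good in fixes:
--         if lowers.startswith(bad):
--             x = good + x[len(bad):]
--             return x
--     return x
-- ===== SOURCE B (Python) =====
-- # B: replaces A's prefix-scanning loop with a single first-token partition plus a dict lookup (idiomatic).
-- _FIXES = {
--     "nd": "and",
--     "r": "or",
--     "pplying": "applying",
--     "griculture": "agriculture",
--     "nterest": "interest",
--     "eneficiary": "beneficiary",
--     "cheme": "Scheme",
--     "oans": "loans",
-- }
--
--
-- def _fix_leading_trunc(s: str) -> str:
--     if not s:
--         return s
--     x = s.lstrip()
--     head, sep, rest = x.partition(" ")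
--     good = _FIXES.get(head.lower())
--     if sep and good is not None:
--         return good + " " + rest
--     return x
-- ===== Notes on version B (the rewrite author's own statement) =====
-- stated objective: idiomatic
-- what changed: A's explicit loop over eight (bad, good) prefix pairs tested with startswith is replaced by partitioning the stripped string at its first space and looking the lowercased first token up in a dict, so the per-prefix scan disappears.
import Mathlib
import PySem

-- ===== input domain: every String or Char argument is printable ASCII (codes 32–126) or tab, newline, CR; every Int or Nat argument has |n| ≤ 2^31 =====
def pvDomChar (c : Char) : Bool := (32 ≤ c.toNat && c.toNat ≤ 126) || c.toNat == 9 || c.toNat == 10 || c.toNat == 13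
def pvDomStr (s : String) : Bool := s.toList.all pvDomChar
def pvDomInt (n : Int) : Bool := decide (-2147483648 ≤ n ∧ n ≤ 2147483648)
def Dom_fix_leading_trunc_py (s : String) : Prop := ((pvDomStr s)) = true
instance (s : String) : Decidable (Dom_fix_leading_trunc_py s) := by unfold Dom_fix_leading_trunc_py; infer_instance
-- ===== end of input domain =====

-- B replaces A's loop over (bad, good) prefix pairs by a first-token partition plus a dict lookup; idiomatic, same cost.

-- ===== PORT A =====
def pvFixesA : List (List Char × List Char) :=
  [("nd ".toList, "and ".toList), ("r ".toList, "or ".toList),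
   ("pplying ".toList, "applying ".toList), ("griculture ".toList, "agriculture ".toList),
   ("nterest ".toList, "interest ".toList), ("eneficiary ".toList, "beneficiary ".toList),
   ("cheme ".toList, "Scheme ".toList), ("oans ".toList, "loans ".toList)]

-- the 'for bad, good in fixes' loop: first matching prefix replaces, else fall through to x
def pvFixLoopA (x lowers : List Char) : List (List Char × List Char) → List Char
  | [] => x
  | (bad, good) :: rest =>
      if PySem.Chars.startswith lowers bad
      then good ++ PySem.List.slice x (some (bad.length : Int)) none
      else pvFixLoopA x lowers rest

def fix_leading_trunc_py (s : String) : String :=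
  if s.toList = [] then s
  else
    let x := PySem.Chars.lstrip s.toList
    let lowers := PySem.Chars.lower x
    String.ofList (pvFixLoopA x lowers pvFixesA)

-- ===== PORT B =====
def pvFixesDict : PySem.Dict (List Char) (List Char) :=
  ⟨[("nd".toList, "and".toList), ("r".toList, "or".toList),
    ("pplying".toList, "applying".toList), ("griculture".toList, "agriculture".toList),
    ("nterest".toList, "interest".toList), ("eneficiary".toList, "beneficiary".toList),
    ("cheme".toList, "Scheme".toList), ("oans".toList, "loans".toList)]⟩

-- x.partition(" ") is ported by hand (exact for the one-char separator " "):
-- head = chars before the first space; dropWhile = [] means sep = "" (no space found),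
-- dropWhile = ' ' :: rest means sep = " " with remainder rest.
def fix_leading_trunc_py_alt (s : String) : String :=
  if s.toList = [] then s
  else
    let x := PySem.Chars.lstrip s.toList
    let head := x.takeWhile (· != ' ')
    match x.dropWhile (· != ' '), pvFixesDict.get? (PySem.Chars.lower head) with
    | _ :: rest, some good => String.ofList (good ++ ' ' :: rest)
    | _, _ => String.ofList x

-- ===== PRECONDITION & SPEC =====
def Spec_fix_leading_trunc_py (s : String) (out : String) : Prop := out = fix_leading_trunc_py_alt s
instance (s : String) (out : String) : Decidable (Spec_fix_leading_trunc_py s out) := by unfold Spec_fix_leading_trunc_py; infer_instance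

-- ===== CLAIM (what is proved, stated in full; the proofs are below) =====
def Claim_equal_fix_leading_trunc_py : Prop := ∀ (s : String), Dom_fix_leading_trunc_py s → Spec_fix_leading_trunc_py s (fix_leading_trunc_py s)

-- ===== LEMMAS AND PROOFS =====

-- lowering a character never creates or destroys a space
theorem pv_lowerChar_ne_space (c : Char) : (PySem.Chars.lowerChar c != ' ') = (c != ' ') := by
  by_cases h : PySem.Chars.isupper c = true
  · simp only [PySem.Chars.lowerChar, h, if_pos]
    simp only [PySem.Chars.isupper, Bool.and_eq_true, decide_eq_true_eq] at h
    have hlo : 65 ≤ c.toNat := Nat.succ_le_of_lt h.1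
    have hhi : c.toNat ≤ 90 := h.2
    have h1 : Nat.isValidChar (c.toNat + 32) := Or.inl (by omega)
    have h2 : (Char.ofNat (c.toNat + 32)).toNat = c.toNat + 32 := by
      rw [Char.toNat_ofNat, if_pos h1]
    have hne : Char.ofNat (c.toNat + 32) ≠ ' ' := by
      intro he; have h3 := congrArg Char.toNat he; rw [h2] at h3
      have h4 : (' ').toNat = 32 := rfl
      omega
    have hne2 : c ≠ ' ' := by
      intro he; subst he
      have h4 : (' ').toNat = 32 := rfl
      omega
    rw [bne_iff_ne.mpr hne, bne_iff_ne.mpr hne2]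
  · simp [PySem.Chars.lowerChar, h]

theorem pv_comp_space : ((fun c => c != ' ') ∘ PySem.Chars.lowerChar) = (fun c : Char => c != ' ') := by
  funext c; exact pv_lowerChar_ne_space c

theorem pv_takeWhile_lower (x : List Char) :
    (PySem.Chars.lower x).takeWhile (· != ' ') = PySem.Chars.lower (x.takeWhile (· != ' ')) := by
  simp only [PySem.Chars.lower, List.takeWhile_map, pv_comp_space]

theorem pv_dropWhile_lower (x : List Char) :
    (PySem.Chars.lower x).dropWhile (· != ' ') = PySem.Chars.lower (x.dropWhile (· != ' ')) := by
  simp only [PySem.Chars.lower, List.dropWhile_map, pv_comp_space]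

theorem pv_head_dropWhile {p : Char → Bool} (l : List Char) (c : Char) (t : List Char)
    (h : l.dropWhile p = c :: t) : p c = false := by
  have h0 : 0 < (l.dropWhile p).length := by rw [h]; simp
  have h1 := List.dropWhile_get_zero_not p l h0
  rw [List.get_mk_zero] at h1
  simp only [h, List.head_cons] at h1
  simpa using h1

-- startswith (k ++ " ") characterised by the partition at the first space
theorem pv_startswith_key (y k : List Char) (hk : ∀ c ∈ k, (c != ' ') = true) :
    PySem.Chars.startswith y (k ++ [' ']) = true ↔
      y.takeWhile (· != ' ') = k ∧ y.dropWhile (· != ' ') ≠ [] := by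
  rw [PySem.Chars.startswith_iff]
  constructor
  · rintro ⟨t, rfl⟩
    rw [List.append_assoc, List.singleton_append]
    constructor
    · simp [List.takeWhile_append, List.takeWhile_eq_self_iff.2 hk]
    · simp [List.dropWhile_append, List.dropWhile_eq_nil_iff.2 hk]
  · rintro ⟨h1, h2⟩
    cases hd : y.dropWhile (· != ' ') with
    | nil => exact absurd hd h2
    | cons c t =>
      have hc : (c != ' ') = false := pv_head_dropWhile y c t hd
      have hc' : c = ' ' := by simpa using hc
      subst hc'
      have hy : y = k ++ ' ' :: t := by
        conv_lhs => rw [← List.takeWhile_append_dropWhile (p := fun c : Char => c != ' ') (l := y)]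
        rw [h1, hd]
      exact ⟨t, by rw [hy, List.append_assoc, List.singleton_append]⟩

-- the main correspondence: A's prefix loop over keys-with-trailing-space equals
-- B's partition-and-lookup, for any key table without spaces in its keys
theorem pv_loop_eq (x : List Char) (items : List (List Char × List Char))
    (hk : ∀ p ∈ items, ∀ c ∈ p.1, (c != ' ') = true) :
    pvFixLoopA x (PySem.Chars.lower x)
        (items.map (fun p => (p.1 ++ [' '], p.2 ++ [' ']))) =
      (match x.dropWhile (· != ' '),
             (PySem.Dict.mk items).get? (PySem.Chars.lower (x.takeWhile (· != ' '))) with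
       | _ :: rest, some good => good ++ ' ' :: rest
       | _, _ => x) := by
  induction items with
  | nil =>
    simp only [List.map_nil, pvFixLoopA, PySem.Dict.get?, List.find?_nil, Option.map_none]
    cases x.dropWhile (· != ' ') <;> rfl
  | cons p rest ih =>
    obtain ⟨k, g⟩ := p
    have hk0 : ∀ c ∈ k, (c != ' ') = true := hk ⟨k, g⟩ (List.mem_cons_self ..)
    have hkr : ∀ p ∈ rest, ∀ c ∈ p.1, (c != ' ') = true :=
      fun p hp => hk p (List.mem_cons_of_mem _ hp)
    simp only [List.map_cons, pvFixLoopA]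
    by_cases hs : PySem.Chars.startswith (PySem.Chars.lower x) (k ++ [' ']) = true
    · rw [if_pos hs]
      obtain ⟨h1, h2⟩ := (pv_startswith_key _ k hk0).mp hs
      rw [pv_takeWhile_lower] at h1
      rw [pv_dropWhile_lower] at h2
      have hx2 : x.dropWhile (· != ' ') ≠ [] := by
        intro he; rw [he] at h2; exact h2 rfl
      cases hd : x.dropWhile (· != ' ') with
      | nil => exact absurd hd hx2
      | cons c t =>
        have hc : c = ' ' := by simpa using pv_head_dropWhile x c t hd
        subst hc
        have hget : (PySem.Dict.mk ((k, g) :: rest)).get?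
            (PySem.Chars.lower (x.takeWhile (· != ' '))) = some g := by
          simp [PySem.Dict.get?, h1]
        rw [hget]
        have hlen : (x.takeWhile (· != ' ')).length = k.length := by
          rw [← h1]; simp [PySem.Chars.lower]
        have hxeq : x = (x.takeWhile (· != ' ') ++ [' ']) ++ t := by
          conv_lhs => rw [← List.takeWhile_append_dropWhile (p := fun c : Char => c != ' ') (l := x)]
          rw [hd, List.append_assoc, List.singleton_append]
        have hslice : PySem.List.slice x (some (((k ++ [' ']).length : Nat) : Int)) none = t := by
          rw [PySem.List.slice_from_natCast, hxeq]
          have : (k ++ [' ']).length = (x.takeWhile (· != ' ') ++ [' ']).length := by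
            simp [hlen]
          rw [this, List.drop_left]
        rw [hslice, List.append_assoc, List.singleton_append]
    · rw [if_neg hs, ih hkr]
      cases hd : x.dropWhile (· != ' ') with
      | nil =>
        cases (PySem.Dict.mk rest).get? (PySem.Chars.lower (x.takeWhile (· != ' '))) <;>
          cases (PySem.Dict.mk ((k, g) :: rest)).get? (PySem.Chars.lower (x.takeWhile (· != ' '))) <;>
          rfl
      | cons c t =>
        have hne : PySem.Chars.lower (x.takeWhile (· != ' ')) ≠ k := by
          intro he
          apply hs
          apply (pv_startswith_key _ k hk0).mpr
          refine ⟨by rw [pv_takeWhile_lower, he], ?_⟩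
          rw [pv_dropWhile_lower, hd]
          simp [PySem.Chars.lower]
        have hget : (PySem.Dict.mk ((k, g) :: rest)).get?
            (PySem.Chars.lower (x.takeWhile (· != ' '))) =
            (PySem.Dict.mk rest).get? (PySem.Chars.lower (x.takeWhile (· != ' '))) := by
          simp [PySem.Dict.get?, beq_eq_false_iff_ne.mpr (Ne.symm hne)]
        rw [hget]

theorem pv_fixesA_eq :
    pvFixesA = pvFixesDict.items.map (fun p => (p.1 ++ [' '], p.2 ++ [' '])) := rfl

theorem pv_fixes_no_space : ∀ p ∈ pvFixesDict.items, ∀ c ∈ p.1, (c != ' ') = true := by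
  intro p hp c hc
  have h : pvFixesDict.items.all (fun p => p.1.all (fun c => c != ' ')) = true := rfl
  exact List.all_eq_true.mp (List.all_eq_true.mp h p hp) c hc

-- ===== VERDICT (by name: the statement is the Claim_ definition above) =====
theorem fix_leading_trunc_py_spec : Claim_equal_fix_leading_trunc_py := by
  intro s _
  show fix_leading_trunc_py s = fix_leading_trunc_py_alt s
  unfold fix_leading_trunc_py fix_leading_trunc_py_alt
  by_cases he : s.toList = []
  · rw [if_pos he, if_pos he]
  · rw [if_neg he, if_neg he]
    dsimp only
    rw [pv_fixesA_eq, pv_loop_eq _ _ pv_fixes_no_space]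
    cases (PySem.Chars.lstrip s.toList).dropWhile (· != ' ') with
    | nil =>
      cases pvFixesDict.get?
          (PySem.Chars.lower ((PySem.Chars.lstrip s.toList).takeWhile (· != ' '))) <;> rfl
    | cons c t =>
      cases pvFixesDict.get?
          (PySem.Chars.lower ((PySem.Chars.lstrip s.toList).takeWhile (· != ' '))) <;> rfl
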